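-- pv_equiv track=rewrite | github.com/etcyl/discogs-recommender | services/radio_service.py | _spread_artists
-- ===== SOURCE A (Python) =====
-- def _spread_artists(songs: list[dict]) -> list[dict]:
--     """Reorder songs so no two consecutive tracks share the same artist.
--
--     Uses a greedy approach: pick the next song whose artist differs from the
--     previous one.  Falls back to allowing a repeat only when no other option
--     remains (e.g. a single artist dominates the list).
--     """
--     if len(songs) <= 1:
--         return songs
--
--     remaining = list(songs)
--     result: list[dict] = [remaining.pop(0)]
--
--     while remaining:
--         last_artist = result[-1].get("artist", "").lower().strip()
--         # Find first candidate whose artist differs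
--         for i, song in enumerate(remaining):
--             if song.get("artist", "").lower().strip() != last_artist:
--                 result.append(remaining.pop(i))
--                 break
--         else:
--             # Every remaining song is the same artist — just take one
--             result.append(remaining.pop(0))
--
--     return result
-- ===== SOURCE B (Python) =====
-- def _spread_artists(songs: list[dict]) -> list[dict]:
--     """Reorder songs so no two consecutive tracks share the same artist.
--
--     One linear pass: songs whose artist matches the currently "blocked"
--     artist are parked in a FIFO buffer; each time a differing song is
--     emitted, one parked song is emitted right after it (its artist now
--     differs from the just-emitted one).  Leftover parked songs are
--     flushed at the end.
--     """
--     if not songs: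
--         return songs
--
--     def key(s):
--         return s.get("artist", "").lower().strip()
--
--     result = [songs[0]]
--     last = key(songs[0])
--     held = []          # FIFO of parked songs, all sharing the blocked artist
--     hi = 0             # front of the FIFO
--
--     for song in songs[1:]:
--         if key(song) == last:
--             held.append(song)
--         elif hi < len(held):
--             result.append(song)
--             h = held[hi]
--             hi += 1
--             result.append(h)
--             last = key(h)
--         else:
--             result.append(song)
--             last = key(song)
--
--     result.extend(held[hi:])
--     return result
-- ===== Notes on version B (the rewrite author's own statement) =====
-- stated objective: alternative
-- what changed: A repeatedly rescans and pop(i)'s the remaining list to find the next differing-artist song; B makes one left-to-right pass, parking blocked-artist songs in a FIFO buffer and emitting one parked song after each differing song, flushing the buffer at the end.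
import Mathlib
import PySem

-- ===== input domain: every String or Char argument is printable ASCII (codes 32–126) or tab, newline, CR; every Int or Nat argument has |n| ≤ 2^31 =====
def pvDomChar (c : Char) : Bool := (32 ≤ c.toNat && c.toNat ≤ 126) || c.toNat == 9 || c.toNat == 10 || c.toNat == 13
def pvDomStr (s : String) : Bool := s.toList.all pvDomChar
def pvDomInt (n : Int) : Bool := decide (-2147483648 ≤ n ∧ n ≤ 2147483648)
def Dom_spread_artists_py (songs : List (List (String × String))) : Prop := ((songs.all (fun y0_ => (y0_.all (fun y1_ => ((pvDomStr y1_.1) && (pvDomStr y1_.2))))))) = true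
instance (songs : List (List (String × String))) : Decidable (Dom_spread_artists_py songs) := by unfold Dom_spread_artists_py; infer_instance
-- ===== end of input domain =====

-- B replaces A's repeated "scan remaining for a differing artist, then pop(i)" with a
-- single left-to-right pass that parks blocked-artist songs in a FIFO buffer (objective: alternative).

-- ===== PORT A =====

-- song.get("artist", "") : first-match lookup in the association list
def pvDget : List (String × String) → String → String → String
  | [], _, d => d
  | (k, v) :: t, key, d => if k == key then v else pvDget t key d

-- song.get("artist", "").lower().strip()
def pvAkey (s : List (String × String)) : String :=
  PySem.Str.strip (PySem.Str.lower (pvDget s "artist" ""))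

-- A's inner for/enumerate + remaining.pop(i): first song whose key differs, with the rest
-- (the key function is a parameter so the loops stay abstract in `pvAkey`)
def pvPickA (key : List (String × String) → String) (last : String) :
    List (List (String × String)) →
    Option ((List (String × String)) × List (List (String × String)))
  | [] => none
  | s :: t =>
    if key s != last then some (s, t)
    else
      match pvPickA key last t with
      | some (x, r) => some (x, s :: r)
      | none => none

-- termination measure for pvALoop, cited by its decreasing_by
theorem pvPickA_length {key : List (String × String) → String} {last : String} :
    ∀ {l : List (List (String × String))} {x r},
      pvPickA key last l = some (x, r) → r.length + 1 = l.length := by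
  intro l
  induction l with
  | nil => intro x r h; simp [pvPickA] at h
  | cons s t ih =>
    intro x r h
    simp only [pvPickA] at h
    split at h
    · cases h; simp
    · cases he : pvPickA key last t with
      | none => rw [he] at h; cases h
      | some p =>
        rw [he] at h
        cases p with
        | mk x' r' =>
          cases h
          have := ih he
          simp [← this]

-- A's while loop over `remaining`, tracking last = key(result[-1])
def pvALoop (key : List (String × String) → String) :
    List (List (String × String)) → String → List (List (String × String))
  | [], _ => []
  | s :: t, last =>
    match h : pvPickA key last (s :: t) with
    | some (x, r) => x :: pvALoop key r (key x)
    | none => s :: pvALoop key t (key s)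
termination_by l _ => l.length
decreasing_by
  · have h1 := pvPickA_length h
    simp only [List.length_cons] at h1 ⊢
    omega
  · simp only [List.length_cons]
    omega

def spread_artists_py (songs : List (List (String × String))) : List (List (String × String)) :=
  match songs with
  | [] => songs
  | [_] => songs
  | s :: rest => s :: pvALoop pvAkey rest (pvAkey s)

-- ===== PORT B =====

-- B's single pass: `held` is the FIFO of parked songs (all sharing the blocked artist = last)
def pvBLoop (key : List (String × String) → String) :
    List (List (String × String)) → String → List (List (String × String)) →
    List (List (String × String))
  | [], _, held => held
  | s :: t, last, held =>
    if key s == last then pvBLoop key t last (held ++ [s])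
    else
      match held with
      | [] => s :: pvBLoop key t (key s) []
      | h :: hs => s :: h :: pvBLoop key t (key h) hs

def spread_artists_py_alt (songs : List (List (String × String))) : List (List (String × String)) :=
  match songs with
  | [] => songs
  | s :: rest => s :: pvBLoop pvAkey rest (pvAkey s) []

-- ===== PRECONDITION & SPEC =====
def Spec_spread_artists_py (songs : List (List (String × String))) (out : List (List (String × String))) : Prop := out = spread_artists_py_alt songs
instance (songs : List (List (String × String))) (out : List (List (String × String))) : Decidable (Spec_spread_artists_py songs out) := by unfold Spec_spread_artists_py; infer_instance

-- ===== CLAIM (what is proved, stated in full; the proofs are below) =====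
def Claim_equal_spread_artists_py : Prop := ∀ (songs : List (List (String × String))), Dom_spread_artists_py songs → Spec_spread_artists_py songs (spread_artists_py songs)

-- ===== LEMMAS AND PROOFS =====

theorem pvPickA_none {key : List (String × String) → String} {last : String}
    {l : List (List (String × String))}
    (h : ∀ x ∈ l, key x = last) : pvPickA key last l = none := by
  induction l with
  | nil => rfl
  | cons s t ih =>
    have hs : key s = last := h s (by simp)
    simp only [pvPickA, hs, bne_self_eq_false, if_false, Bool.false_eq_true]
    rw [ih (fun x hx => h x (by simp [hx]))]

theorem pvPickA_skip {key : List (String × String) → String} {last : String}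
    {pre post : List (List (String × String))} {s : List (String × String)}
    (hpre : ∀ x ∈ pre, key x = last) (hs : key s ≠ last) :
    pvPickA key last (pre ++ s :: post) = some (s, pre ++ post) := by
  induction pre with
  | nil => simp [pvPickA, hs]
  | cons p t ih =>
    have hp : key p = last := hpre p (by simp)
    simp only [List.cons_append, pvPickA, hp, bne_self_eq_false, if_false, Bool.false_eq_true]
    rw [ih (fun x hx => hpre x (by simp [hx]))]

theorem pvALoop_cons (key : List (String × String) → String)
    (s : List (String × String)) (t : List (List (String × String))) (last : String) :
    pvALoop key (s :: t) last =
      match pvPickA key last (s :: t) with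
      | some (x, r) => x :: pvALoop key r (key x)
      | none => s :: pvALoop key t (key s) := by
  rw [pvALoop]
  rcases hp : pvPickA key last (s :: t) with _ | ⟨x, r⟩
  · simp
  · simp

theorem pvALoop_pick {key : List (String × String) → String} {last : String}
    {s x : List (String × String)} {t r : List (List (String × String))}
    (h : pvPickA key last (s :: t) = some (x, r)) :
    pvALoop key (s :: t) last = x :: pvALoop key r (key x) := by
  rw [pvALoop_cons, h]

theorem pvALoop_nopick {key : List (String × String) → String} {last : String}
    {s : List (String × String)} {t : List (List (String × String))}
    (h : pvPickA key last (s :: t) = none) :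
    pvALoop key (s :: t) last = s :: pvALoop key t (key s) := by
  rw [pvALoop_cons, h]

theorem pvALoop_all_same {key : List (String × String) → String}
    {held : List (List (String × String))} {last : String}
    (h : ∀ x ∈ held, key x = last) : pvALoop key held last = held := by
  induction held with
  | nil => rw [pvALoop]
  | cons s t ih =>
    rw [pvALoop_nopick (pvPickA_none h)]
    have hs : key s = last := h s (by simp)
    rw [hs, ih (fun x hx => h x (by simp [hx]))]

-- the invariant: all parked songs share the blocked artist `last`
theorem pvLoop_agree (key : List (String × String) → String) :
    ∀ (rest held : List (List (String × String))) (last : String),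
      (∀ x ∈ held, key x = last) →
      pvALoop key (held ++ rest) last = pvBLoop key rest last held := by
  intro rest
  induction rest with
  | nil =>
    intro held last h
    simp only [List.append_nil, pvBLoop]
    exact pvALoop_all_same h
  | cons s t ih =>
    intro held last h
    by_cases hk : key s = last
    · -- parked: B moves s into held
      simp only [pvBLoop, hk, beq_self_eq_true, if_true]
      have he : held ++ s :: t = (held ++ [s]) ++ t := by simp
      rw [he, ih (held ++ [s]) last]
      intro x hx
      rcases List.mem_append.mp hx with h1 | h1
      · exact h x h1
      · simp at h1; subst h1; exact hk
    · -- differing artist: A picks s past the held prefix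
      have hne : (key s == last) = false := by simp [hk]
      cases held with
      | nil =>
        simp only [List.nil_append, pvBLoop, hne, Bool.false_eq_true, if_false]
        have hp : pvPickA key last (s :: t) = some (s, t) := by
          simpa using pvPickA_skip (pre := []) (post := t) (s := s) (by simp) hk
        rw [pvALoop_pick hp, ← ih [] (key s) (by simp), List.nil_append]
      | cons hd hs =>
        have hhd : key hd = last := h hd (by simp)
        simp only [pvBLoop, hne, Bool.false_eq_true, if_false]
        have hp : pvPickA key last (hd :: (hs ++ s :: t)) = some (s, hd :: (hs ++ t)) := by
          have := pvPickA_skip (pre := hd :: hs) (post := t) (s := s)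
            (fun x hx => h x hx) hk
          simpa using this
        rw [List.cons_append, pvALoop_pick hp]
        have h2 : pvPickA key (key s) (hd :: (hs ++ t)) = some (hd, hs ++ t) := by
          have hne2 : (key hd != key s) = true := by
            simp only [bne_iff_ne, ne_eq, hhd]
            exact fun hEq => hk hEq.symm
          simp [pvPickA, hne2]
        rw [pvALoop_pick h2]
        rw [ih hs (key hd) (fun x hx => by rw [hhd]; exact h x (by simp [hx]))]

-- ===== VERDICT (by name: the statement is the Claim_ definition above) =====
theorem spread_artists_py_spec : Claim_equal_spread_artists_py := by
  intro songs _
  unfold Spec_spread_artists_py spread_artists_py spread_artists_py_alt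
  match songs with
  | [] => rfl
  | [s] => rfl
  | s :: s2 :: rest =>
    simp only
    rw [← pvLoop_agree pvAkey (s2 :: rest) [] (pvAkey s) (by simp), List.nil_append]
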